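-- pv_equiv track=rewrite | github.com/bsquiroz/learn_with_exercises | 05_dict/07_countHobbies/main.py | sumAges
-- ===== SOURCE A (Python) =====
-- def sumAges(users):
--     countHobbies = {}
--
--     for user in users:
--         for hobbie in user['hobbies']:
--
--             if hobbie in countHobbies:
--                 countHobbies[hobbie] += 1
--             else:
--                 countHobbies[hobbie] = 1
--
--     return countHobbies
-- ===== SOURCE B (Python) =====
-- def sumAges(users):
--     flat = [h for user in users for h in user['hobbies']]
--     seen = []
--     for h in flat:
--         if h not in seen:
--             seen.append(h)
--     return {h: flat.count(h) for h in seen}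
-- ===== Notes on version B (the rewrite author's own statement) =====
-- stated objective: alternative
-- what changed: Replaces the nested-loop incremental dict counting with a flatten-then-count strategy: build one flat hobby list by comprehension, dedup it in first-occurrence order, and build the result dict by counting each distinct hobby with list.count.
import Mathlib
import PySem

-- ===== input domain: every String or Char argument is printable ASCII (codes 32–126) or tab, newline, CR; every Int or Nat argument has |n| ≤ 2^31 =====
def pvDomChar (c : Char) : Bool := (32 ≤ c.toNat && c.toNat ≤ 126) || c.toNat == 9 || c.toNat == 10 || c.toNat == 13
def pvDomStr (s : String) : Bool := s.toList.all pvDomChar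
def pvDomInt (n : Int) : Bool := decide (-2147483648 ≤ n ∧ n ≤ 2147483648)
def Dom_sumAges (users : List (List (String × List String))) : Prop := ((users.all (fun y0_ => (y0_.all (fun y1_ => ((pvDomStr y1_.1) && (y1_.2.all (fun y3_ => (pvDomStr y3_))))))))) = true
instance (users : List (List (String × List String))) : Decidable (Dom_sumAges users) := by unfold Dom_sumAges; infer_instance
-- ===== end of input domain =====

-- B counts by flattening all hobbies, deduping in first-occurrence order, and counting with list.count;
-- same return value as A (alternative decomposition, not claimed faster).

-- ===== PORT A =====
def sumAges (users : List (List (String × List String))) : List (String × Int) :=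
  (users.foldl
    (fun cnt user =>
      ((PySem.Dict.mk user).getD "hobbies" []).foldl
        (fun cnt h =>
          if cnt.contains h then cnt.insert h (cnt.getD h 0 + 1)
          else cnt.insert h 1)
        cnt)
    PySem.Dict.empty).items

-- ===== PORT B =====
def sumAges_alt (users : List (List (String × List String))) : List (String × Int) :=
  let flat := users.flatMap (fun user => (PySem.Dict.mk user).getD "hobbies" [])
  let seen := flat.foldl (fun s h => if h ∈ s then s else s ++ [h]) []
  (seen.foldl (fun d h => d.insert h ((flat.count h : Int))) PySem.Dict.empty).items

-- ===== PRECONDITION & SPEC =====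
-- Pre_ excludes exactly the users missing the 'hobbies' key, on which A raises KeyError.
def Pre_sumAges (users : List (List (String × List String))) : Prop :=
  ∀ user ∈ users, (PySem.Dict.mk user).contains "hobbies" = true
instance (users : List (List (String × List String))) : Decidable (Pre_sumAges users) := by unfold Pre_sumAges; infer_instance
def pvWitness_sumAges : (List (List (String × List String))) :=
  [[("hobbies", ["chess", "go"]), ("name", ["ann"])], [("hobbies", ["go"])]]

def Spec_sumAges (users : List (List (String × List String))) (out : List (String × Int)) : Prop := out = sumAges_alt users
instance (users : List (List (String × List String))) (out : List (String × Int)) : Decidable (Spec_sumAges users out) := by unfold Spec_sumAges; infer_instance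

-- ===== CLAIM (what is proved, stated in full; the proofs are below) =====
def Claim_equal_sumAges : Prop := ∀ (users : List (List (String × List String))), Dom_sumAges users → Pre_sumAges users → Spec_sumAges users (sumAges users)

-- ===== LEMMAS AND PROOFS =====

-- A's per-hobby step is exactly the counting insert, both branches.
theorem sumAges_step_eq (cnt : PySem.Dict String Int) (h : String) :
    (if cnt.contains h then cnt.insert h (cnt.getD h 0 + 1) else cnt.insert h 1)
      = cnt.insert h (cnt.getD h 0 + 1) := by
  by_cases hc : cnt.contains h = true
  · simp [hc]
  · simp [hc, PySem.Dict.getD_of_not_contains cnt 0 (by simpa using hc)]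

-- A's nested fold is the counting fold over the flattened hobby list.
theorem sumAges_eq_counter_items (users : List (List (String × List String))) :
    sumAges users =
      (PySem.Dict.counter
        (users.flatMap (fun user => (PySem.Dict.mk user).getD "hobbies" []))).items := by
  unfold sumAges
  rw [show (fun (cnt : PySem.Dict String Int) (user : List (String × List String)) =>
        ((PySem.Dict.mk user).getD "hobbies" []).foldl
          (fun cnt h => if cnt.contains h then cnt.insert h (cnt.getD h 0 + 1)
                        else cnt.insert h 1) cnt)
      = (fun cnt user =>
        ((PySem.Dict.mk user).getD "hobbies" []).foldl
          (fun cnt h => cnt.insert h (cnt.getD h 0 + 1)) cnt) from by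
        funext cnt user
        exact PySem.List.foldl_congr_mem _ _ _ _ (fun acc x _ => sumAges_step_eq acc x)]
  rw [List.flatMap_def,
      show List.foldl
          (fun (cnt : PySem.Dict String Int) user =>
            List.foldl (fun cnt h => cnt.insert h (cnt.getD h 0 + 1)) cnt
              ((PySem.Dict.mk user).getD "hobbies" []))
          PySem.Dict.empty users
        = List.foldl (fun cnt h => cnt.insert h (cnt.getD h 0 + 1)) PySem.Dict.empty
            (users.map (fun user => (PySem.Dict.mk user).getD "hobbies" [])).flatten from by
        rw [List.foldl_flatten, List.foldl_map],
      PySem.Dict.foldl_insert_getD_add_one_eq_counter]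

-- B's seen-loop builds Set.ofList of the flattened list.
theorem seen_eq_ofList (flat : List String) :
    flat.foldl (fun s h => if h ∈ s then s else s ++ [h]) [] = PySem.Set.ofList flat := by
  rw [PySem.Set.ofList_eq_foldl]
  refine PySem.List.foldl_congr_mem _ _ _ _ (fun acc x _ => ?_)
  simp [PySem.Set.add, PySem.Set.contains]

theorem sumAges_alt_eq (users : List (List (String × List String))) :
    sumAges_alt users =
      (PySem.Set.ofList
          (users.flatMap (fun user => (PySem.Dict.mk user).getD "hobbies" []))).map
        (fun h => (h, ((users.flatMap (fun user => (PySem.Dict.mk user).getD "hobbies" [])).count h : Int))) := by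
  unfold sumAges_alt
  dsimp only
  rw [seen_eq_ofList]
  rw [PySem.Dict.items_foldl_insert_fresh _ (fun h => h) _ _
        (by intro a _; simp [PySem.Dict.contains_empty])
        (by simp [PySem.Set.nodup_ofList])]
  simp [PySem.Dict.empty]

-- ===== VERDICT (by name: the statement is the Claim_ definition above) =====
theorem sumAges_spec : Claim_equal_sumAges := by
  intro users _ _
  unfold Spec_sumAges
  rw [sumAges_eq_counter_items, sumAges_alt_eq, PySem.Dict.items_counter]
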